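-- pv_equiv track=rewrite | github.com/reccleston/python-practice | snakeFillingArea.py | snakefill
-- ===== SOURCE A (Python) =====
-- def snakefill(n):
--     n = int(n)
--     body_size = 1
--     eat_count = 0
--     area = n * n
--
--     while (body_size < area - body_size):
--
--         eat_count += 1
--         body_size *= 2
--
--     return f'the snake can eat {eat_count} times before running out of space in a {n}x{n} grid'
-- ===== SOURCE B (Python) =====
-- def snakefill(n):
--     n = int(n)
--     area = n * n
--     eat_count = max(0, (area - 1).bit_length() - 1)
--     return f'the snake can eat {eat_count} times before running out of space in a {n}x{n} grid'
-- ===== Notes on version B (the rewrite author's own statement) =====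
-- stated objective: alternative
-- what changed: Replaced the doubling while-loop with a closed-form eat count computed from the integer bit length of area minus one, using exact integer arithmetic.
import Mathlib
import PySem

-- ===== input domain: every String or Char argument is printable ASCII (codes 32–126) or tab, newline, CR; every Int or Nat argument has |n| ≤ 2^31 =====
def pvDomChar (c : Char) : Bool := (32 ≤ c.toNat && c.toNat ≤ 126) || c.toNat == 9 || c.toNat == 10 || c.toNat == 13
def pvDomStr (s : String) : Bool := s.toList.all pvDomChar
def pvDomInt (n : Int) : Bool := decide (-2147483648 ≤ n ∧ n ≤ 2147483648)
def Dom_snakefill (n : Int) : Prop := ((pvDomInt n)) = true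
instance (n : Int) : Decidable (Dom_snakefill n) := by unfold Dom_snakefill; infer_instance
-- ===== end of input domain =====

-- ===== PORT A =====
-- B replaces A's doubling loop with a closed-form bit-length eat count; return value only.
def loopA (area body eat : Int) : Int :=
  if h : 0 < body ∧ body < area - body then loopA area (body * 2) (eat + 1) else eat
termination_by (area - 2 * body).toNat
decreasing_by omega

def snakefill (n : Int) : String :=
  let area := n * n
  let eat := loopA area 1 0
  "the snake can eat " ++ PySem.Int.toStr eat ++
    " times before running out of space in a " ++ PySem.Int.toStr n ++ "x" ++
    PySem.Int.toStr n ++ " grid"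

-- ===== PORT B =====
-- (area-1).bit_length() is Nat.size (area-1).natAbs (area-1 is -1 or a natural here)
def snakefill_alt (n : Int) : String :=
  let area := n * n
  let eat := max 0 ((Nat.size (area - 1).natAbs : Int) - 1)
  "the snake can eat " ++ PySem.Int.toStr eat ++
    " times before running out of space in a " ++ PySem.Int.toStr n ++ "x" ++
    PySem.Int.toStr n ++ " grid"

-- ===== PRECONDITION & SPEC =====
def Spec_snakefill (n : Int) (out : String) : Prop := out = snakefill_alt n
instance (n : Int) (out : String) : Decidable (Spec_snakefill n out) := by unfold Spec_snakefill; infer_instance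

-- ===== CLAIM (what is proved, stated in full; the proofs are below) =====
def Claim_equal_snakefill : Prop := ∀ (n : Int), Dom_snakefill n → Spec_snakefill n (snakefill n)

-- ===== LEMMAS AND PROOFS =====

-- ===== VERDICT (by name: the statement is the Claim_ definition above) =====
theorem loopA_eq (area : Int) (h0 : 0 ≤ area) (k : Nat) (e : Int) :
    loopA area (2 ^ k) e = e + ((Nat.size (area - 1).natAbs - (k + 1) : Nat) : Int) := by
  rw [loopA]
  split
  case isTrue h =>
    have hpow : (2 : Int) ^ (k + 1) = 2 ^ k + 2 ^ k := by ring
    have h2 : (2 : Int) ^ (k + 1) < area := by omega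
    have hc : ((2 ^ (k + 1) : Nat) : Int) = (2 : Int) ^ (k + 1) := by push_cast; ring
    have hle : (2 ^ (k + 1) : Nat) ≤ (area - 1).natAbs := by omega
    have hsz : k + 2 ≤ Nat.size (area - 1).natAbs := Nat.lt_size.mpr hle
    rw [show (2 : Int) ^ k * 2 = 2 ^ (k + 1) from by ring]
    rw [loopA_eq area h0 (k + 1) (e + 1)]
    omega
  case isFalse h =>
    have hk : (0 : Int) < 2 ^ k := by positivity
    have hpow : (2 : Int) ^ (k + 1) = 2 ^ k + 2 ^ k := by ring
    have hc : ((2 ^ (k + 1) : Nat) : Int) = (2 : Int) ^ (k + 1) := by push_cast; ring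
    have hlt : (area - 1).natAbs < 2 ^ (k + 1) := by omega
    have hsz : Nat.size (area - 1).natAbs ≤ k + 1 := Nat.size_le.mpr hlt
    omega
termination_by area.toNat - k
decreasing_by
  have hk : (k : Int) < 2 ^ k := by exact_mod_cast Nat.lt_two_pow_self
  omega

theorem snakefill_spec : Claim_equal_snakefill := by
  intro n _
  unfold Spec_snakefill snakefill snakefill_alt
  have h0 : 0 ≤ n * n := mul_self_nonneg n
  have h1 : loopA (n * n) 1 0 = max 0 ((Nat.size (n * n - 1).natAbs : Int) - 1) := by
    have := loopA_eq (n * n) h0 0 0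
    rw [pow_zero] at this
    omega
  simp only [h1]
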